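-- pv_equiv track=rewrite | github.com/Gaju27/Assignment_17_B | prime_num_interval.py | prime_num_interval
-- ===== SOURCE A (Python) =====
-- def prime_num_interval(lower,upper):
--     for num in range(lower, upper + 1):
--        # all prime numbers are greater than 1
--        if num > 1:
--            for i in range(2, num):
--                if (num % i) == 0:
--                    break
--            else:
--                return (num)
-- ===== SOURCE B (Python) =====
-- def _is_prime(n):
--     i = 2
--     while i * i <= n:
--         if n % i == 0:
--             return False
--         i += 1
--     return True
--
--
-- def prime_num_interval(lower, upper):
--     num = lower if lower > 2 else 2
--     while num <= upper:
--         if _is_prime(num):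
--             return num
--         num += 1
--     return None
-- ===== Notes on version B (the rewrite author's own statement) =====
-- stated objective: alternative
-- what changed: Replaces A's full trial-division inner scan over all i in [2, num) with a sqrt-bounded divisor test (while i*i <= n), and starts the outer scan at max(lower, 2) instead of filtering num <= 1 inside the loop.
import Mathlib
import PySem

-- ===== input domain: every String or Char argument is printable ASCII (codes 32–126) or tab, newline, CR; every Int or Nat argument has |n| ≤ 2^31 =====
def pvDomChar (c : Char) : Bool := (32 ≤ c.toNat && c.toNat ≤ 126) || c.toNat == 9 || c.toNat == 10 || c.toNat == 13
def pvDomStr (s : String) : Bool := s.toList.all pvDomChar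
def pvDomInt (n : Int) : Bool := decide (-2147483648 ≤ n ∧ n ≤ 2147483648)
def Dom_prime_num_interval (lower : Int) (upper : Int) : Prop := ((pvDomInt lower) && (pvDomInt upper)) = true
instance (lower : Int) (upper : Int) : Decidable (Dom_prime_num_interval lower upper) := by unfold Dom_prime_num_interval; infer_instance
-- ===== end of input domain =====

-- B replaces A's full trial-division scan (all i in [2, num)) by a sqrt-bounded
-- divisor test (while i*i <= n) and starts the outer search at max(lower, 2); same return value everywhere.


-- ===== PORT A =====
-- inner 'for i in range(2, num): if num % i == 0: break / else: return num':
-- the for-else succeeds iff NO i in range(2, num) divides num.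
def pyDivAny (num : Int) : Bool :=
  (PySem.List.pyRange 2 num).any (fun i => PySem.Int.mod num i == 0)

-- 'for num in range(lower, upper+1): if num > 1 and <no divisor>: return num' (implicit None)
def prime_num_interval (lower : Int) (upper : Int) : Option Int :=
  (PySem.List.pyRange lower (upper + 1)).find? (fun num => decide (1 < num) && !(pyDivAny num))

-- ===== PORT B =====
-- _is_prime: while i*i <= n: …  (the '2 ≤ i' conjunct is a totality guard only;
-- i starts at 2 and only increases, so it is always true when called)
def bIsPrime (n : Int) (i : Int) : Bool :=
  if h : 2 ≤ i ∧ i * i ≤ n then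
    if PySem.Int.mod n i == 0 then false else bIsPrime n (i + 1)
  else true
termination_by (n + 1 - i).toNat
decreasing_by
  have hi : i * 1 ≤ i * i := by
    exact mul_le_mul_of_nonneg_left (by omega) (by omega)
  omega

-- outer: num = max(lower, 2); while num <= upper: if _is_prime(num): return num; num += 1
def bSearch (num : Int) (upper : Int) : Option Int :=
  if num ≤ upper then
    if bIsPrime num 2 then some num else bSearch (num + 1) upper
  else none
termination_by (upper + 1 - num).toNat

def prime_num_interval_alt (lower : Int) (upper : Int) : Option Int :=
  bSearch (max lower 2) upper

-- ===== PRECONDITION & SPEC =====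
def Spec_prime_num_interval (lower : Int) (upper : Int) (out : Option Int) : Prop := out = prime_num_interval_alt lower upper
instance (lower : Int) (upper : Int) (out : Option Int) : Decidable (Spec_prime_num_interval lower upper out) := by unfold Spec_prime_num_interval; infer_instance

-- ===== CLAIM (what is proved, stated in full; the proofs are below) =====
def Claim_equal_prime_num_interval : Prop := ∀ (lower : Int) (upper : Int), Dom_prime_num_interval lower upper → Spec_prime_num_interval lower upper (prime_num_interval lower upper)

-- ===== LEMMAS AND PROOFS =====

-- A's inner test succeeds iff num has no divisor in [2, num)
theorem pyDivAny_eq_false_iff (n : Int) :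
    pyDivAny n = false ↔ ∀ i : Int, 2 ≤ i → i < n → ¬ (i ∣ n) := by
  unfold pyDivAny
  simp [List.any_eq_false, PySem.List.mem_pyRange_one, PySem.Int.mod_eq_zero_iff_dvd]

-- B's inner loop returns true iff no j ≥ i with j*j ≤ n divides n
theorem bIsPrime_iff_aux (fuel : Nat) : ∀ (n i : Int), (n + 1 - i).toNat ≤ fuel → 2 ≤ i →
    (bIsPrime n i = true ↔ ∀ j : Int, i ≤ j → j * j ≤ n → ¬ (j ∣ n)) := by
  induction fuel with
  | zero =>
    intro n i hf h2
    have hni : n < i := by omega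
    have hc : ¬ (2 ≤ i ∧ i * i ≤ n) := by
      rintro ⟨-, hii⟩
      have : i * 1 ≤ i * i := mul_le_mul_of_nonneg_left (by omega) (by omega)
      omega
    rw [bIsPrime, dif_neg hc]
    simp only [true_iff]
    intro j hij hjj _
    have : j * 1 ≤ j * j := mul_le_mul_of_nonneg_left (by omega) (by omega)
    omega
  | succ f ih =>
    intro n i hf h2
    rw [bIsPrime]
    by_cases hc : 2 ≤ i ∧ i * i ≤ n
    · rw [dif_pos hc]
      have hile : i * 1 ≤ i * i := mul_le_mul_of_nonneg_left (by omega) (by omega)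
      by_cases hd : i ∣ n
      · have hmod : (PySem.Int.mod n i == 0) = true := by
          rw [beq_iff_eq, PySem.Int.mod_eq_zero_iff_dvd]; exact hd
        rw [hmod, if_pos rfl]
        constructor
        · intro h; exact absurd h Bool.false_ne_true
        · intro hall; exact absurd hd (hall i le_rfl hc.2)
      · have hmod : (PySem.Int.mod n i == 0) = false := by
          rw [beq_eq_false_iff_ne]; rw [ne_eq, PySem.Int.mod_eq_zero_iff_dvd]; exact hd
        rw [hmod]
        simp only [Bool.false_eq_true, if_false]
        rw [ih n (i + 1) (by omega) (by omega)]
        constructor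
        · intro hall j hij hjj hjd
          rcases eq_or_lt_of_le hij with heq | hlt
          · exact hd (heq ▸ hjd)
          · exact hall j (by omega) hjj hjd
        · intro hall j hij hjj hjd
          exact hall j (by omega) hjj hjd
    · rw [dif_neg hc]
      simp only [true_iff]
      intro j hij hjj hjd
      have hmm : i * i ≤ j * j := mul_le_mul hij hij (by omega) (by omega)
      exact hc ⟨h2, by omega⟩

theorem bIsPrime_eq_true_iff (n : Int) (i : Int) (h2 : 2 ≤ i) :
    bIsPrime n i = true ↔ ∀ j : Int, i ≤ j → j * j ≤ n → ¬ (j ∣ n) :=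
  bIsPrime_iff_aux (n + 1 - i).toNat n i le_rfl h2

-- core number theory: for n ≥ 2, "no divisor in [2, n)" ↔ "no divisor j with j*j ≤ n"
theorem trial_div_iff_sqrt (n : Int) (hn : 2 ≤ n) :
    (∀ i : Int, 2 ≤ i → i < n → ¬ (i ∣ n)) ↔ (∀ j : Int, 2 ≤ j → j * j ≤ n → ¬ (j ∣ n)) := by
  constructor
  · intro h j h2 hjj hjd
    have : j < n := by nlinarith
    exact h j h2 this hjd
  · intro h i h2 hin hid
    -- n is not prime (it has the divisor i with 2 ≤ i < n); its least factor f has f*f ≤ n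
    set m : Nat := n.toNat with hm
    have hmn : (m : Int) = n := Int.toNat_of_nonneg (by omega)
    have hm2 : 2 ≤ m := by omega
    have hnp : ¬ m.Prime := by
      intro hp
      have hid' : i.toNat ∣ m := by
        have : ((i.toNat : Int)) ∣ ((m : Int)) := by
          rwa [hmn, Int.toNat_of_nonneg (by omega : (0:Int) ≤ i)]
        exact_mod_cast this
      rcases (Nat.Prime.eq_one_or_self_of_dvd hp _ hid') with h1 | h1 <;> omega
    have hsq := Nat.minFac_sq_le_self (by omega) hnp
    have hfd := Nat.minFac_dvd m
    have hf2 : 2 ≤ m.minFac := (Nat.minFac_prime (by omega : m ≠ 1)).two_le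
    refine h (m.minFac : Int) (by exact_mod_cast hf2) ?_ ?_
    · have : m.minFac * m.minFac ≤ m := by nlinarith [hsq]
      calc ((m.minFac : Int)) * (m.minFac : Int) = ((m.minFac * m.minFac : Nat) : Int) := by push_cast; ring
        _ ≤ (m : Int) := by exact_mod_cast this
        _ = n := hmn
    · rw [← hmn]; exact_mod_cast hfd

-- both primality tests agree for n ≥ 2
theorem tests_agree (n : Int) (hn : 2 ≤ n) : (!(pyDivAny n)) = bIsPrime n 2 := by
  by_cases hb : bIsPrime n 2 = true
  · rw [hb]
    have h := (bIsPrime_eq_true_iff n 2 le_rfl).mp hb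
    have : pyDivAny n = false :=
      (pyDivAny_eq_false_iff n).mpr ((trial_div_iff_sqrt n hn).mpr h)
    rw [this]; rfl
  · rw [Bool.not_eq_true] at hb
    rw [hb]
    cases hA : pyDivAny n
    · exfalso
      have h1 := (pyDivAny_eq_false_iff n).mp hA
      have h2 := (trial_div_iff_sqrt n hn).mp h1
      have := (bIsPrime_eq_true_iff n 2 le_rfl).mpr h2
      rw [hb] at this; exact Bool.false_ne_true this
    · rfl

-- main loop correspondence
theorem search_eq (fuel : Nat) : ∀ (num upper : Int), (upper + 1 - num).toNat ≤ fuel →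
    (PySem.List.pyRange num (upper + 1)).find? (fun k => decide (1 < k) && !(pyDivAny k))
      = bSearch (max num 2) upper := by
  induction fuel with
  | zero =>
    intro num upper hf
    have hgt : upper < num := by omega
    rw [PySem.List.pyRange_one_eq_nil (by omega)]
    rw [bSearch]
    have : ¬ (max num 2 ≤ upper) := by
      rcases le_or_gt 2 num with h | h
      · rw [max_eq_left h]; omega
      · rw [max_eq_right (by omega)]; omega
    simp [this, List.find?]
  | succ f ih =>
    intro num upper hf
    rcases le_or_gt num upper with hle | hgt
    · rw [PySem.List.pyRange_one_cons (by omega)]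
      rw [List.find?_cons]
      rcases le_or_gt 2 num with h2 | h2
      · -- num ≥ 2
        rw [max_eq_left h2]
        rw [bSearch]
        rw [if_pos hle]
        rw [← tests_agree num h2]
        have hnum1 : decide (1 < num) = true := by simp; omega
        rw [hnum1]
        cases hA : pyDivAny num
        · simp
        · simp only [Bool.not_true, Bool.and_false]
          rw [ih (num + 1) upper (by omega)]
          congr 1
          omega
      · -- num ≤ 1 : A skips it, both sides search from 2
        have hnum1 : decide (1 < num) = false := by simp; omega
        rw [hnum1]
        simp only [Bool.false_and]
        rw [ih (num + 1) upper (by omega)]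
        congr 1
        omega
    · rw [PySem.List.pyRange_one_eq_nil (by omega)]
      rw [bSearch]
      have : ¬ (max num 2 ≤ upper) := by
        rcases le_or_gt 2 num with h | h
        · rw [max_eq_left h]; omega
        · rw [max_eq_right (by omega)]; omega
      simp [this, List.find?]

-- ===== VERDICT (by name: the statement is the Claim_ definition above) =====
theorem prime_num_interval_spec : Claim_equal_prime_num_interval := by
  intro lower upper _
  unfold Spec_prime_num_interval prime_num_interval prime_num_interval_alt
  exact search_eq (upper + 1 - lower).toNat lower upper le_rfl
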